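-- pv_equiv track=rewrite | github.com/benjaminlq/paper_implementation | bert/src/utils/token_classification.py | _extract_first_word_indices
-- ===== SOURCE A (Python) =====
-- from typing import List, Dict, Optional
--
-- def _extract_first_word_indices(
--     word_ids: List[int]
-- ):
--     extracted_indices = []
--     curr_word_id = None
--     for idx, word_id in enumerate(word_ids):
--         if word_id is not None and word_id != curr_word_id:
--             extracted_indices.append(idx)
--             curr_word_id = word_id
--     return extracted_indices
-- ===== SOURCE B (Python) =====
-- def _last_non_null(word_ids, i):
--     for j in range(i - 1, -1, -1):
--         if word_ids[j] is not None:
--             return word_ids[j]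
--     return None
--
--
-- def _extract_first_word_indices(
--     word_ids
-- ):
--     return [i for i, w in enumerate(word_ids)
--             if w is not None and w != _last_non_null(word_ids, i)]
-- ===== Notes on version B (the rewrite author's own statement) =====
-- stated objective: alternative
-- what changed: Replaces A's single-pass running curr_word_id state machine with a stateless per-index characterization: index i is kept iff word_ids[i] is non-None and differs from the last non-None value before i, found by an independent backward index scan (early return) per position.
import Mathlib
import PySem

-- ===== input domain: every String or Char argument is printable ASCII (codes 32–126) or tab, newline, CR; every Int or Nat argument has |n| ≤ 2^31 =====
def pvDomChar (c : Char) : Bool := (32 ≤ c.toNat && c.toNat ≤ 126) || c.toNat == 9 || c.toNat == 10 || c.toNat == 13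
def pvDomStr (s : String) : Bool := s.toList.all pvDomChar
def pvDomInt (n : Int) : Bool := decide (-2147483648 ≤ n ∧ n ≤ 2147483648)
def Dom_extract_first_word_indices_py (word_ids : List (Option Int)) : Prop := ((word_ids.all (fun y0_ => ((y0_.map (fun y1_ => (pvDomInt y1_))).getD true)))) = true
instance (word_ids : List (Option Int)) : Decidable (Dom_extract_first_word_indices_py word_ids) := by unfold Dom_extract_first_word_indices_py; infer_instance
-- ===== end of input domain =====

-- B drops A's running state: each index is tested independently against the last non-None value
-- of its own prefix word_ids[:i]; return-value equivalence proved (alternative decomposition, not faster).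

-- ===== PORT A =====
-- the for-loop of A over enumerate(word_ids): state = (idx, curr_word_id, extracted_indices)
def pvALoop : Int → Option Int → List Int → List (Option Int) → List Int
  | _, _, acc, [] => acc
  | i, curr, acc, w :: rest =>
    if w ≠ none ∧ w ≠ curr then pvALoop (i + 1) w (acc ++ [i]) rest
    else pvALoop (i + 1) curr acc rest

def extract_first_word_indices_py (word_ids : List (Option Int)) : List Int :=
  pvALoop 0 none [] word_ids

-- ===== PORT B =====
-- _last_non_null(word_ids, i): the for-loop over range(i-1, -1, -1), early return at the first
-- non-None word_ids[j]; word_ids[j] via pyGetD is exact here since every visited j is in range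
def pvScan (ws : List (Option Int)) : List Int → Option Int
  | [] => none
  | j :: rest =>
    match PySem.List.pyGetD ws j none with
    | some v => some v
    | none => pvScan ws rest

-- the comprehension over enumerate(word_ids): filter by the per-index condition, keep the indices
def extract_first_word_indices_py_alt (word_ids : List (Option Int)) : List Int :=
  ((PySem.List.enumerate word_ids).filter (fun p =>
      p.2 != none && p.2 != pvScan word_ids (PySem.List.pyRange (p.1 - 1) (-1) (-1)))).map (·.1)

-- ===== PRECONDITION & SPEC =====
def Spec_extract_first_word_indices_py (word_ids : List (Option Int)) (out : List Int) : Prop := out = extract_first_word_indices_py_alt word_ids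
instance (word_ids : List (Option Int)) (out : List Int) : Decidable (Spec_extract_first_word_indices_py word_ids out) := by unfold Spec_extract_first_word_indices_py; infer_instance

-- ===== CLAIM =====
def Claim_equal_extract_first_word_indices_py : Prop := ∀ (word_ids : List (Option Int)), Dom_extract_first_word_indices_py word_ids → Spec_extract_first_word_indices_py word_ids (extract_first_word_indices_py word_ids)

-- ===== LEMMAS AND PROOFS =====
-- proof-only helper: the last non-None value of a prefix, read off the reversed prefix
def pvLastNonNull : List (Option Int) → Option Int
  | [] => none
  | none :: rest => pvLastNonNull rest
  | some v :: _ => some v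

-- B's backward index scan over range(|pre|-1, -1, -1) computes the last non-None of the prefix
lemma pvScan_eq (pre : List (Option Int)) : ∀ (suf : List (Option Int)),
    pvScan (pre ++ suf) (PySem.List.pyRange ((pre.length : Int) - 1) (-1) (-1))
    = pvLastNonNull pre.reverse := by
  induction pre using List.reverseRecOn with
  | nil =>
      intro suf
      rw [PySem.List.pyRange_neg_one_eq_nil (by norm_num)]
      simp [pvScan, pvLastNonNull]
  | append_singleton q w ih =>
      intro suf
      have hlen : ((q ++ [w]).length : Int) - 1 = (q.length : Int) := by simp
      rw [hlen, PySem.List.pyRange_neg_one_cons (by omega)]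
      have hget : PySem.List.pyGetD ((q ++ [w]) ++ suf) (q.length : Int) none = w := by
        rw [PySem.List.pyGetD_natCast]
        simp
      rw [pvScan, hget]
      cases w with
      | some v => simp [pvLastNonNull]
      | none =>
          have := ih (none :: suf)
          simp only [List.append_assoc, List.cons_append, List.nil_append] at this ⊢
          rw [this]
          simp [pvLastNonNull]

-- Invariant: after processing prefix `pre`, A's curr_word_id is pvLastNonNull pre.reverse,
-- and B's backward scan from each index recomputes exactly that value.
lemma pvMain (suf : List (Option Int)) : ∀ (pre : List (Option Int)) (ws : List (Option Int))
    (acc : List Int), ws = pre ++ suf →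
    pvALoop (pre.length : Int) (pvLastNonNull pre.reverse) acc suf
    = acc ++ ((PySem.List.enumerate suf (pre.length : Int)).filter (fun p =>
        p.2 != none && p.2 != pvScan ws (PySem.List.pyRange (p.1 - 1) (-1) (-1)))).map (·.1) := by
  induction suf with
  | nil => intro pre ws acc _; simp [pvALoop, PySem.List.enumerate]
  | cons w rest ih =>
      intro pre ws acc hws
      have hscan : pvScan ws (PySem.List.pyRange ((pre.length : Int) - 1) (-1) (-1))
          = pvLastNonNull pre.reverse := by
        rw [hws]; exact pvScan_eq pre (w :: rest)
      have hcast : ((pre ++ [w]).length : Int) = (pre.length : Int) + 1 := by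
        simp
      have hws' : ws = (pre ++ [w]) ++ rest := by simp [hws]
      rw [PySem.List.enumerate_cons]
      by_cases hc : w ≠ none ∧ w ≠ pvLastNonNull pre.reverse
      · -- branch taken: index kept, curr becomes w
        have hcurr : pvLastNonNull (pre ++ [w]).reverse = w := by
          obtain ⟨hn, _⟩ := hc
          cases w with
          | none => exact absurd rfl hn
          | some v => simp [pvLastNonNull]
        have hb : (w != none && w != pvScan ws
              (PySem.List.pyRange ((pre.length : Int) - 1) (-1) (-1))) = true := by
          rw [hscan]
          simp [hc.1, hc.2]
        rw [pvALoop, if_pos hc]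
        simp only [List.filter_cons, hb, if_true]
        have := ih (pre ++ [w]) ws (acc ++ [(pre.length : Int)]) hws'
        rw [hcast, hcurr] at this
        rw [this]
        simp
      · -- branch not taken: curr unchanged
        have hcurr : pvLastNonNull (pre ++ [w]).reverse = pvLastNonNull pre.reverse := by
          rcases not_and_or.mp hc with hn | he
          · have : w = none := not_not.mp hn
            subst this; simp [pvLastNonNull]
          · have : w = pvLastNonNull pre.reverse := not_not.mp he
            cases w with
            | none => simp [pvLastNonNull]
            | some v => rw [← this]; simp [pvLastNonNull]
        have hb : (w != none && w != pvScan ws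
              (PySem.List.pyRange ((pre.length : Int) - 1) (-1) (-1))) = false := by
          rw [hscan]
          rcases not_and_or.mp hc with hn | he
          · simp [not_not.mp hn]
          · simp [not_not.mp he]
        rw [pvALoop, if_neg hc]
        simp only [List.filter_cons, hb]
        have := ih (pre ++ [w]) ws acc hws'
        rw [hcast, hcurr] at this
        exact this

-- ===== VERDICT =====
theorem extract_first_word_indices_py_spec : Claim_equal_extract_first_word_indices_py := by
  intro ws _
  unfold Spec_extract_first_word_indices_py extract_first_word_indices_py extract_first_word_indices_py_alt
  simpa [pvLastNonNull] using pvMain ws [] ws [] (by simp)
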